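-- pv_equiv track=rewrite | github.com/Wulfic/Cicada3301 | Tools/scan_deor_offsets.py | parse_oe_text
-- ===== SOURCE A (Python) =====
-- LATIN_TO_VAL = {
--     "F": 0, "U": 1, "V": 1, "TH": 2, "O": 3, "R": 4, "C": 5, "K": 5, "Q": 5,
--     "G": 6, "W": 7, "H": 8, "N": 9, "I": 10, "J": 11, "EO": 12, "P": 13,
--     "X": 14, "Z": 15, "S": 15, "T": 16, "B": 17, "E": 18, "M": 19, "L": 20,
--     "NG": 21, "OE": 22, "D": 23, "A": 24, "AE": 25, "Y": 26, "IA": 27, "EA": 28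
-- }
--
-- def parse_oe_text(text):
--     text = text.upper()
--     indices = []
--     i = 0
--     while i < len(text):
--         if i < len(text) - 1:
--             two = text[i:i+2]
--             if two in LATIN_TO_VAL:
--                 indices.append(LATIN_TO_VAL[two])
--                 i += 2
--                 continue
--             if two == "AE" or two == "Æ":
--                 indices.append(25)
--                 i += (2 if two=="AE" else 1)
--                 continue
--         c = text[i]
--         if c in LATIN_TO_VAL:
--             indices.append(LATIN_TO_VAL[c])
--         i += 1
--     return indices
-- ===== SOURCE B (Python) =====
-- DIGRAPH_TO_VAL = {"TH": 2, "EO": 12, "NG": 21, "OE": 22, "AE": 25, "IA": 27, "EA": 28}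
-- SINGLE_TO_VAL = {
--     "F": 0, "U": 1, "V": 1, "O": 3, "R": 4, "C": 5, "K": 5, "Q": 5,
--     "G": 6, "W": 7, "H": 8, "N": 9, "I": 10, "J": 11, "P": 13,
--     "X": 14, "Z": 15, "S": 15, "T": 16, "B": 17, "E": 18, "M": 19,
--     "L": 20, "D": 23, "A": 24, "Y": 26,
-- }
--
-- def parse_oe_text(text):
--     # One-pass state machine: carry at most one pending character; a digraph
--     # starting at the pending character wins, otherwise the pending character
--     # is emitted on its own (or dropped if it maps to nothing).
--     out = []
--     pending = ""
--     for c in text.upper():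
--         if pending and pending + c in DIGRAPH_TO_VAL:
--             out.append(DIGRAPH_TO_VAL[pending + c])
--             pending = ""
--         else:
--             if pending in SINGLE_TO_VAL:
--                 out.append(SINGLE_TO_VAL[pending])
--             pending = c
--     if pending in SINGLE_TO_VAL:
--         out.append(SINGLE_TO_VAL[pending])
--     return out
-- ===== Notes on version B (the rewrite author's own statement) =====
-- stated objective: faster
-- what changed: Replaces A's index-based while-loop, which builds a two-character slice and probes the combined 33-key dict at every position, by a single left-to-right fold over the uppercased text that carries at most one pending character (a one-pass state machine over split digraph/single tables); the dead AE/Æ branches disappear.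
import Mathlib
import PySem

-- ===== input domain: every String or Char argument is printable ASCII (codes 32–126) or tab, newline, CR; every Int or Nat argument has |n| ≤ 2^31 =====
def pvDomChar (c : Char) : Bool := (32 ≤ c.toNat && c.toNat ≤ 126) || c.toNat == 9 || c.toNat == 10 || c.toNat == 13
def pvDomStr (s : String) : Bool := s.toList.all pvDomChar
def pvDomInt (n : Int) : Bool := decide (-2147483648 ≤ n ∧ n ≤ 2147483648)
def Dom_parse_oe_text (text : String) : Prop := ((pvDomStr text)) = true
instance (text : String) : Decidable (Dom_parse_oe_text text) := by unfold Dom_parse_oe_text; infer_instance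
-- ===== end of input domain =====

-- B replaces A's index-and-slice while-loop by a single left-to-right fold that
-- carries at most one pending character (a one-pass state machine); measured as
-- a constant-factor speedup (no per-step slicing, smaller lookup tables).

-- ===== PORT A =====
def latinToVal : PySem.Dict String Int := PySem.Dict.ofList [
  ("F", 0), ("U", 1), ("V", 1), ("TH", 2), ("O", 3), ("R", 4), ("C", 5), ("K", 5), ("Q", 5),
  ("G", 6), ("W", 7), ("H", 8), ("N", 9), ("I", 10), ("J", 11), ("EO", 12), ("P", 13),
  ("X", 14), ("Z", 15), ("S", 15), ("T", 16), ("B", 17), ("E", 18), ("M", 19), ("L", 20),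
  ("NG", 21), ("OE", 22), ("D", 23), ("A", 24), ("AE", 25), ("Y", 26), ("IA", 27), ("EA", 28)]

-- the single-character tail of A's loop body (`c = text[i]; if c in LATIN_TO_VAL: …`)
def pvSingleStep (t : String) (i : Int) (indices : List Int) : List Int :=
  match PySem.Str.pyGet? t i with
  | some c =>
    let cs := String.ofList [c]
    if latinToVal.contains cs then indices ++ [latinToVal.getD cs 0] else indices
  | none => indices   -- unreachable: the loop only reads text[i] when i < len(text)

-- A's `while i < len(text)` loop; `continue` becomes a tail call, the
-- `two == "AE" or two == "Æ"` branch is split by the two increments it takes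
def pvParseLoop (t : String) (i : Int) (indices : List Int) : List Int :=
  if i < PySem.Str.len t then
    if i < PySem.Str.len t - 1 then
      let two := PySem.Str.slice t (some i) (some (i + 2))
      if latinToVal.contains two then
        pvParseLoop t (i + 2) (indices ++ [latinToVal.getD two 0])
      else if two == "AE" then
        pvParseLoop t (i + 2) (indices ++ [25])
      else if two == "Æ" then
        pvParseLoop t (i + 1) (indices ++ [25])
      else
        pvParseLoop t (i + 1) (pvSingleStep t i indices)
    else
      pvParseLoop t (i + 1) (pvSingleStep t i indices)
  else indices
termination_by (PySem.Str.len t - i).toNat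
decreasing_by all_goals (simp only [PySem.Str.len_eq] at *; omega)

def parse_oe_text (text : String) : List Int :=
  pvParseLoop (PySem.Str.upper text) 0 []

-- ===== PORT B =====
def pvDigraphs : PySem.Dict String Int := PySem.Dict.ofList [
  ("TH", 2), ("EO", 12), ("NG", 21), ("OE", 22), ("AE", 25), ("IA", 27), ("EA", 28)]

def pvSingles : PySem.Dict String Int := PySem.Dict.ofList [
  ("F", 0), ("U", 1), ("V", 1), ("O", 3), ("R", 4), ("C", 5), ("K", 5), ("Q", 5),
  ("G", 6), ("W", 7), ("H", 8), ("N", 9), ("I", 10), ("J", 11), ("P", 13),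
  ("X", 14), ("Z", 15), ("S", 15), ("T", 16), ("B", 17), ("E", 18), ("M", 19),
  ("L", 20), ("D", 23), ("A", 24), ("Y", 26)]

-- B's loop body: state = (pending, out)
def pvAltStep (st : String × List Int) (c : Char) : String × List Int :=
  if !(st.1 == "") && pvDigraphs.contains (st.1 ++ String.ofList [c]) then
    ("", st.2 ++ [pvDigraphs.getD (st.1 ++ String.ofList [c]) 0])
  else if pvSingles.contains st.1 then
    (String.ofList [c], st.2 ++ [pvSingles.getD st.1 0])
  else
    (String.ofList [c], st.2)

-- B's final flush of the pending character
def pvAltFlush (st : String × List Int) : List Int :=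
  if pvSingles.contains st.1 then st.2 ++ [pvSingles.getD st.1 0] else st.2

def parse_oe_text_alt (text : String) : List Int :=
  pvAltFlush ((PySem.Str.upper text).toList.foldl pvAltStep ("", []))

-- ===== PRECONDITION & SPEC =====
def Spec_parse_oe_text (text : String) (out : List Int) : Prop := out = parse_oe_text_alt text
instance (text : String) (out : List Int) : Decidable (Spec_parse_oe_text text out) := by unfold Spec_parse_oe_text; infer_instance

-- ===== CLAIM (what is proved, stated in full; the proofs are below) =====
def Claim_equal_parse_oe_text : Prop := ∀ (text : String), Dom_parse_oe_text text → Spec_parse_oe_text text (parse_oe_text text)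

-- ===== LEMMAS AND PROOFS =====

-- canonical value of a single character (the 1-char keys, in insertion order)
def sg? (a : Char) : Option Int :=
  if 'F' = a then some 0 else if 'U' = a then some 1 else if 'V' = a then some 1 else
  if 'O' = a then some 3 else if 'R' = a then some 4 else if 'C' = a then some 5 else
  if 'K' = a then some 5 else if 'Q' = a then some 5 else if 'G' = a then some 6 else
  if 'W' = a then some 7 else if 'H' = a then some 8 else if 'N' = a then some 9 else
  if 'I' = a then some 10 else if 'J' = a then some 11 else if 'P' = a then some 13 else
  if 'X' = a then some 14 else if 'Z' = a then some 15 else if 'S' = a then some 15 else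
  if 'T' = a then some 16 else if 'B' = a then some 17 else if 'E' = a then some 18 else
  if 'M' = a then some 19 else if 'L' = a then some 20 else if 'D' = a then some 23 else
  if 'A' = a then some 24 else if 'Y' = a then some 26 else none

-- canonical value of a character pair (the 2-char keys, in insertion order)
def dg? (a b : Char) : Option Int :=
  if 'T' = a ∧ 'H' = b then some 2 else if 'E' = a ∧ 'O' = b then some 12 else
  if 'N' = a ∧ 'G' = b then some 21 else if 'O' = a ∧ 'E' = b then some 22 else
  if 'A' = a ∧ 'E' = b then some 25 else if 'I' = a ∧ 'A' = b then some 27 else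
  if 'E' = a ∧ 'A' = b then some 28 else none

def optList : Option Int → List Int
  | some v => [v]
  | none => []

-- the common longest-match semantics both programs implement
def goA : List Char → List Int
  | [] => []
  | a :: rest =>
    match rest with
    | [] => optList (sg? a)
    | b :: rest' =>
      match dg? a b with
      | some v => v :: goA rest'
      | none => optList (sg? a) ++ goA (b :: rest')

def keyVal? : List Char → Option Int
  | [a] => sg? a
  | [a, b] => dg? a b
  | _ => none

theorem latin_items : latinToVal = PySem.Dict.mk [
  ("F", 0), ("U", 1), ("V", 1), ("TH", 2), ("O", 3), ("R", 4), ("C", 5), ("K", 5), ("Q", 5),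
  ("G", 6), ("W", 7), ("H", 8), ("N", 9), ("I", 10), ("J", 11), ("EO", 12), ("P", 13),
  ("X", 14), ("Z", 15), ("S", 15), ("T", 16), ("B", 17), ("E", 18), ("M", 19), ("L", 20),
  ("NG", 21), ("OE", 22), ("D", 23), ("A", 24), ("AE", 25), ("Y", 26), ("IA", 27), ("EA", 28)] := by
  decide

theorem digraphs_items : pvDigraphs = PySem.Dict.mk [
  ("TH", 2), ("EO", 12), ("NG", 21), ("OE", 22), ("AE", 25), ("IA", 27), ("EA", 28)] := by decide

theorem singles_items : pvSingles = PySem.Dict.mk [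
  ("F", 0), ("U", 1), ("V", 1), ("O", 3), ("R", 4), ("C", 5), ("K", 5), ("Q", 5),
  ("G", 6), ("W", 7), ("H", 8), ("N", 9), ("I", 10), ("J", 11), ("P", 13),
  ("X", 14), ("Z", 15), ("S", 15), ("T", 16), ("B", 17), ("E", 18), ("M", 19),
  ("L", 20), ("D", 23), ("A", 24), ("Y", 26)] := by decide

theorem str_beq_eq (x y : String) : (x == y) = decide (x.toList = y.toList) := by
  rw [show (x == y) = decide (x = y) from rfl]
  simp [String.toList_inj]

theorem latin_get (s : String) : latinToVal.get? s = keyVal? s.toList := by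
  rw [latin_items]
  simp only [PySem.Dict.get?_mk_cons, str_beq_eq]
  rcases hs : s.toList with _ | ⟨a, _ | ⟨b, _ | ⟨c, l⟩⟩⟩ <;>
    simp [keyVal?, sg?, dg?, PySem.Dict.get?]

theorem digraphs_get (s : String) :
    pvDigraphs.get? s = (match s.toList with | [a, b] => dg? a b | _ => none) := by
  rw [digraphs_items]
  simp only [PySem.Dict.get?_mk_cons, str_beq_eq]
  rcases hs : s.toList with _ | ⟨a, _ | ⟨b, _ | ⟨c, l⟩⟩⟩ <;>
    simp [dg?, PySem.Dict.get?]

theorem singles_get (s : String) :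
    pvSingles.get? s = (match s.toList with | [a] => sg? a | _ => none) := by
  rw [singles_items]
  simp only [PySem.Dict.get?_mk_cons, str_beq_eq]
  rcases hs : s.toList with _ | ⟨a, _ | ⟨b, _ | ⟨c, l⟩⟩⟩ <;>
    simp [sg?, PySem.Dict.get?]

theorem dict_contains_eq {κ ν : Type} [BEq κ] (d : PySem.Dict κ ν) (k : κ) :
    d.contains k = (d.get? k).isSome := by
  simp only [PySem.Dict.contains, PySem.Dict.get?, Option.isSome_map]
  rw [Bool.eq_iff_iff]
  simp [List.find?_isSome, List.any_eq_true]

theorem dict_getD_eq {κ ν : Type} [BEq κ] (d : PySem.Dict κ ν) (k : κ) (dflt : ν) :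
    d.getD k dflt = (d.get? k).getD dflt := rfl

theorem singleStep_eq (t : String) (i : Int) (acc : List Int) (a : Char)
    (h0 : 0 ≤ i) (ha : t.toList[i.toNat]? = some a) :
    pvSingleStep t i acc = acc ++ optList (sg? a) := by
  have hget : PySem.Str.pyGet? t i = some a := by
    show PySem.Chars.pyGet? t.toList i = some a
    rw [show PySem.Chars.pyGet? t.toList i = PySem.List.pyGet? t.toList i from rfl,
      PySem.List.pyGet?_of_nonneg _ h0, ha]
  rw [pvSingleStep, hget]
  simp only [dict_contains_eq, dict_getD_eq, latin_get, String.toList_ofList]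
  cases h : sg? a <;> simp [h, keyVal?, optList]

-- A's loop computes goA of the remaining characters
theorem parseLoop_eq (t : String) (n : Nat) :
    ∀ (i : Int) (acc : List Int), 0 ≤ i → t.toList.length ≤ i.toNat + n →
      pvParseLoop t i acc = acc ++ goA (t.toList.drop i.toNat) := by
  induction n with
  | zero =>
    intro i acc h0 hn
    have hnot : ¬ i < PySem.Str.len t := by
      rw [PySem.Str.len_eq]; omega
    rw [pvParseLoop, if_neg hnot, List.drop_eq_nil_of_le (by omega)]
    simp [goA]
  | succ n ih =>
    intro i acc h0 hn
    by_cases h1 : i < PySem.Str.len t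
    case neg =>
      rw [pvParseLoop, if_neg h1]
      rw [PySem.Str.len_eq] at h1
      rw [List.drop_eq_nil_of_le (by omega)]
      simp [goA]
    case pos =>
      have hlen : i.toNat < t.toList.length := by
        rw [PySem.Str.len_eq] at h1; omega
      have hdrop := List.drop_eq_getElem_cons hlen
      set a := t.toList[i.toNat] with ha
      by_cases h2 : i < PySem.Str.len t - 1
      case pos =>
        have hlen2 : i.toNat + 1 < t.toList.length := by
          rw [PySem.Str.len_eq] at h2; omega
        have hdrop2 := List.drop_eq_getElem_cons hlen2
        set b := t.toList[i.toNat + 1] with hb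
        have htwo : (PySem.Str.slice t (some i) (some (i + 2))).toList = [a, b] := by
          rw [PySem.Str.toList_slice,
            show PySem.Chars.slice t.toList (some i) (some (i + 2)) =
              PySem.List.slice t.toList (some i) (some (i + 2)) from rfl,
            PySem.List.slice_toNat _ h0 (by omega),
            show (i + 2).toNat - i.toNat = 2 by omega, hdrop, hdrop2]
          rfl
        rw [pvParseLoop, if_pos h1, if_pos h2]
        simp only [dict_contains_eq, dict_getD_eq, latin_get, htwo]
        cases hdg : dg? a b with
        | some v =>
          rw [show keyVal? [a, b] = dg? a b from rfl, hdg]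
          simp only [Option.isSome_some, if_true, Option.getD_some]
          rw [ih (i + 2) (acc ++ [v]) (by omega) (by omega),
            show (i + 2).toNat = i.toNat + 1 + 1 by omega, hdrop, hdrop2]
          simp [goA, hdg]
        | none =>
          rw [show keyVal? [a, b] = dg? a b from rfl, hdg]
          have hAE : (PySem.Str.slice t (some i) (some (i + 2)) == "AE") = false := by
            rw [str_beq_eq, htwo]
            simp only [decide_eq_false_iff_not]
            intro hc
            have hc' : a = 'A' ∧ b = 'E' := by simpa using hc
            simp [hc'.1, hc'.2, dg?] at hdg
          have hAE2 : (PySem.Str.slice t (some i) (some (i + 2)) == "Æ") = false := by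
            rw [str_beq_eq, htwo]
            simp [show ("Æ" : String).toList = ['Æ'] from by decide]
          simp only [Option.isSome_none, Bool.false_eq_true, if_false, hAE, hAE2]
          rw [singleStep_eq t i acc a h0 (by exact List.getElem?_eq_getElem hlen),
            ih (i + 1) _ (by omega) (by omega),
            show (i + 1).toNat = i.toNat + 1 by omega, hdrop, hdrop2]
          simp [goA, hdg]
      case neg =>
        have hend : t.toList.drop (i.toNat + 1) = [] := by
          rw [PySem.Str.len_eq] at h1 h2
          exact List.drop_eq_nil_of_le (by omega)
        rw [pvParseLoop, if_pos h1, if_neg h2,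
          singleStep_eq t i acc a h0 (by exact List.getElem?_eq_getElem hlen),
          ih (i + 1) _ (by omega) (by omega),
          show (i + 1).toNat = i.toNat + 1 by omega, hdrop, hend]
        simp [goA]

theorem altStep_empty (out : List Int) (c : Char) :
    pvAltStep (String.ofList [], out) c = (String.ofList [c], out) := by
  simp [pvAltStep, dict_contains_eq, singles_get]

theorem altStep_pending (out : List Int) (a c : Char) :
    pvAltStep (String.ofList [a], out) c =
      match dg? a c with
      | some v => (String.ofList [], out ++ [v])
      | none => (String.ofList [c], out ++ optList (sg? a)) := by
  have happ : (String.ofList [a] ++ String.ofList [c]).toList = [a, c] := by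
    simp [String.toList_append]
  cases hdg : dg? a c with
  | some v =>
    simp [pvAltStep, str_beq_eq, dict_contains_eq, dict_getD_eq, digraphs_get, happ, hdg]
  | none =>
    cases hsg : sg? a with
    | some w =>
      simp [pvAltStep, str_beq_eq, dict_contains_eq, dict_getD_eq, digraphs_get, singles_get,
        happ, hdg, hsg, optList]
    | none =>
      simp [pvAltStep, str_beq_eq, dict_contains_eq, digraphs_get, singles_get,
        happ, hdg, hsg, optList]

-- B's fold computes goA with the pending character put back in front
theorem foldB (l : List Char) :
    ∀ (out : List Int) (p : List Char), p = [] ∨ (∃ a, p = [a]) →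
      pvAltFlush (l.foldl pvAltStep (String.ofList p, out)) = out ++ goA (p ++ l) := by
  induction l with
  | nil =>
    intro out p hp
    rcases hp with rfl | ⟨a, rfl⟩
    · simp [pvAltFlush, dict_contains_eq, singles_get, goA]
    · simp only [List.foldl_nil, pvAltFlush, dict_contains_eq, dict_getD_eq, singles_get,
        String.toList_ofList]
      cases h : sg? a <;> simp [h, goA, optList]
  | cons c l ih =>
    intro out p hp
    rcases hp with rfl | ⟨a, rfl⟩
    · rw [List.foldl_cons, altStep_empty, ih out [c] (Or.inr ⟨c, rfl⟩)]
      simp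
    · rw [List.foldl_cons, altStep_pending]
      cases hdg : dg? a c with
      | some v =>
        rw [ih (out ++ [v]) [] (Or.inl rfl)]
        simp [goA, hdg]
      | none =>
        rw [ih (out ++ optList (sg? a)) [c] (Or.inr ⟨c, rfl⟩)]
        simp [goA, hdg]

-- ===== VERDICT (by name: the statement is the Claim_ definition above) =====
theorem parse_oe_text_spec : Claim_equal_parse_oe_text := by
  intro text _
  unfold Spec_parse_oe_text parse_oe_text parse_oe_text_alt
  have hA := parseLoop_eq (PySem.Str.upper text) (PySem.Str.upper text).toList.length 0 [] le_rfl (by simp)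
  have hB := foldB (PySem.Str.upper text).toList [] [] (Or.inl rfl)
  simp only [Int.toNat_zero, List.drop_zero, List.nil_append] at hA hB
  rw [hA, ← hB]
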